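-- pv_equiv track=rewrite | github.com/GenukaM/Research_Trends | Game8.py | validate_goal
-- ===== SOURCE A (Python) =====
-- GRID_SIZE =20
--
-- maze = [
--     [2,2,2,2,2,2,2,2,2,0,0,0,2,2,2,2,2,2,2,2],
--     [2,2,2,2,2,2,2,2,2,0,0,0,2,2,2,2,2,2,2,2],
--     [2,2,2,2,2,2,2,2,2,0,0,0,2,2,2,2,2,2,2,2],
--     [2,2,2,2,2,2,2,2,2,0,0,0,2,2,2,2,2,2,2,2],
--     [2,2,2,2,2,2,2,2,2,0,0,0,2,2,2,2,2,2,2,2],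
--     [2,2,2,2,2,2,2,2,2,0,0,0,2,2,2,2,2,2,2,2],
--     [2,2,2,2,2,2,2,2,2,0,0,0,2,2,2,2,2,2,2,2],
--     [2,2,2,2,2,2,2,2,2,0,0,0,2,2,2,2,2,2,2,2],
--     [2,2,2,2,2,2,2,2,2,0,0,0,2,2,2,2,2,2,2,2],
--     [2,2,2,2,2,2,2,2,2,0,0,0,2,2,2,2,2,2,2,2],
--     [2,2,2,2,2,2,2,2,2,0,0,0,2,2,2,2,2,2,2,2],
--     [2,2,2,2,2,2,2,2,2,0,0,0,2,2,2,2,2,2,2,2],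
--     [2,2,2,2,2,2,2,2,2,0,0,0,2,2,2,2,2,2,2,2],
--     [2,2,2,2,2,2,2,2,2,0,0,0,2,2,2,2,2,2,2,2],
--     [2,2,2,2,2,2,2,2,2,0,0,0,2,2,2,2,2,2,2,2],
--     [2,2,2,2,2,2,2,2,2,0,0,0,2,2,2,2,2,2,2,2],
--     [2,2,2,2,2,2,2,2,2,0,0,0,2,2,2,2,2,2,2,2],
--     [2,2,2,2,2,2,2,2,2,0,0,0,2,2,2,2,2,2,2,2],
--     [2,2,2,2,2,2,2,2,2,0,0,0,2,2,2,2,2,2,2,2],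
--     [2,2,2,2,2,2,2,2,2,0,0,0,2,2,2,2,2,2,2,2],
-- ]
--
-- def validate_goal(goal):
--     """Ensure that the goal is in an open space."""
--     x, y = goal
--     if maze[y][x] != 0:  # If the goal is not open, find a new valid goal
--         # For simplicity, let's find the first available open space for the goal
--         for i in range(GRID_SIZE):
--             for j in range(GRID_SIZE):
--                 if maze[j][i] == 0 and j == 0:  # Goal is on top row
--                     return (i, j)
--     return goal
-- ===== SOURCE B (Python) =====
-- GRID_SIZE = 20
--
-- maze = [
--     [2,2,2,2,2,2,2,2,2,0,0,0,2,2,2,2,2,2,2,2],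
--     [2,2,2,2,2,2,2,2,2,0,0,0,2,2,2,2,2,2,2,2],
--     [2,2,2,2,2,2,2,2,2,0,0,0,2,2,2,2,2,2,2,2],
--     [2,2,2,2,2,2,2,2,2,0,0,0,2,2,2,2,2,2,2,2],
--     [2,2,2,2,2,2,2,2,2,0,0,0,2,2,2,2,2,2,2,2],
--     [2,2,2,2,2,2,2,2,2,0,0,0,2,2,2,2,2,2,2,2],
--     [2,2,2,2,2,2,2,2,2,0,0,0,2,2,2,2,2,2,2,2],
--     [2,2,2,2,2,2,2,2,2,0,0,0,2,2,2,2,2,2,2,2],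
--     [2,2,2,2,2,2,2,2,2,0,0,0,2,2,2,2,2,2,2,2],
--     [2,2,2,2,2,2,2,2,2,0,0,0,2,2,2,2,2,2,2,2],
--     [2,2,2,2,2,2,2,2,2,0,0,0,2,2,2,2,2,2,2,2],
--     [2,2,2,2,2,2,2,2,2,0,0,0,2,2,2,2,2,2,2,2],
--     [2,2,2,2,2,2,2,2,2,0,0,0,2,2,2,2,2,2,2,2],
--     [2,2,2,2,2,2,2,2,2,0,0,0,2,2,2,2,2,2,2,2],
--     [2,2,2,2,2,2,2,2,2,0,0,0,2,2,2,2,2,2,2,2],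
--     [2,2,2,2,2,2,2,2,2,0,0,0,2,2,2,2,2,2,2,2],
--     [2,2,2,2,2,2,2,2,2,0,0,0,2,2,2,2,2,2,2,2],
--     [2,2,2,2,2,2,2,2,2,0,0,0,2,2,2,2,2,2,2,2],
--     [2,2,2,2,2,2,2,2,2,0,0,0,2,2,2,2,2,2,2,2],
--     [2,2,2,2,2,2,2,2,2,0,0,0,2,2,2,2,2,2,2,2],
-- ]
--
-- def validate_goal(goal):
--     """Ensure that the goal is in an open space."""
--     x, y = goal
--     if maze[y][x] == 0:
--         return goal
--     # goal blocked: take the first open cell of the top row, if any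
--     for i in range(GRID_SIZE):
--         if maze[0][i] == 0:
--             return (i, 0)
--     return goal
-- ===== Notes on version B (the rewrite author's own statement) =====
-- stated objective: simpler
-- what changed: Replaced A's 20x20 nested scan (whose inner j-loop only ever fires at j==0) by a single flat pass over the top row of the maze.
import Mathlib
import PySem

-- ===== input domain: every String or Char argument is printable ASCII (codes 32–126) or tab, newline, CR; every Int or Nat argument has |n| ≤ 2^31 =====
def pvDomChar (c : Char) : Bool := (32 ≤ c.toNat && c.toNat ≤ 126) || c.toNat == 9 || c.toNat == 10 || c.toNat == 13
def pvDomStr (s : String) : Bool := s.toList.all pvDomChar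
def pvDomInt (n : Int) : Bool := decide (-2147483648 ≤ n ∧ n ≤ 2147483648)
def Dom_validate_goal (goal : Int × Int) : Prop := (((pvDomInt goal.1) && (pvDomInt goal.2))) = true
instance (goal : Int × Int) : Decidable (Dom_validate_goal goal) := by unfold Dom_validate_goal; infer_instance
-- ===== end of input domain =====

-- B replaces A's 20x20 nested scan (whose inner loop only ever fires at j==0) by a single flat pass over the top row: simpler.


-- Module-level constant shared by both programs (same data in Source A and Source B).
def mazeRow0 : List Int := [2,2,2,2,2,2,2,2,2,0,0,0,2,2,2,2,2,2,2,2]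

def mazeL : List (List Int) := List.replicate 20 mazeRow0

-- ===== PORT A =====
-- inner j-loop of A: first j in js with maze[j][i] == 0 and j == 0 (indices here are always in range 0..19)
def aInner (i : Nat) (js : List Nat) : Option (Int × Int) :=
  match js with
  | [] => none
  | j :: rest =>
      if ((mazeL.getD j []).getD i 0 == 0) && (j == 0) then some ((i : Int), (j : Int))
      else aInner i rest

-- outer i-loop of A
def aOuter (is : List Nat) : Option (Int × Int) :=
  match is with
  | [] => none
  | i :: rest =>
      match aInner i (List.range 20) with
      | some p => some p
      | none => aOuter rest

def validate_goal (goal : Int × Int) : Int × Int :=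
  let x := goal.1
  let y := goal.2
  match PySem.List.pyGet? mazeL y with
  | none => goal            -- IndexError in Python: excluded by Pre_
  | some row =>
      match PySem.List.pyGet? row x with
      | none => goal        -- IndexError in Python: excluded by Pre_
      | some v =>
          if v ≠ 0 then
            match aOuter (List.range 20) with
            | some p => p
            | none => goal
          else goal

-- ===== PORT B =====
-- single flat pass over the top row: first i with maze[0][i] == 0
def bScan (is : List Nat) : Option Int :=
  match is with
  | [] => none
  | i :: rest => if mazeRow0.getD i 0 == 0 then some (i : Int) else bScan rest

def validate_goal_alt (goal : Int × Int) : Int × Int :=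
  let x := goal.1
  let y := goal.2
  match PySem.List.pyGet? mazeL y with
  | none => goal            -- IndexError in Python: excluded by Pre_
  | some row =>
      match PySem.List.pyGet? row x with
      | none => goal        -- IndexError in Python: excluded by Pre_
      | some v =>
          if v == 0 then goal
          else
            match bScan (List.range 20) with
            | some i => (i, 0)
            | none => goal

-- ===== PRECONDITION & SPEC =====
-- Pre_ excludes exactly the inputs where Python raises IndexError (goal indices outside -20..19).
def Pre_validate_goal (goal : Int × Int) : Prop :=
  -20 ≤ goal.1 ∧ goal.1 ≤ 19 ∧ -20 ≤ goal.2 ∧ goal.2 ≤ 19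
instance (goal : Int × Int) : Decidable (Pre_validate_goal goal) := by unfold Pre_validate_goal; infer_instance
def pvWitness_validate_goal : (Int × Int) := (3, 5)

def Spec_validate_goal (goal : Int × Int) (out : Int × Int) : Prop := out = validate_goal_alt goal
instance (goal : Int × Int) (out : Int × Int) : Decidable (Spec_validate_goal goal out) := by unfold Spec_validate_goal; infer_instance

-- ===== CLAIM (what is proved, stated in full; the proofs are below) =====
def Claim_equal_validate_goal : Prop := ∀ (goal : Int × Int), Dom_validate_goal goal → Pre_validate_goal goal → Spec_validate_goal goal (validate_goal goal)

-- ===== LEMMAS AND PROOFS =====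
theorem aOuter_eval : aOuter (List.range 20) = some (9, 0) := by decide

theorem bScan_eval : bScan (List.range 20) = some 9 := by decide

-- ===== VERDICT (by name: the statement is the Claim_ definition above) =====
theorem validate_goal_spec : Claim_equal_validate_goal := by
  intro ⟨x, y⟩ _ _
  show validate_goal (x, y) = validate_goal_alt (x, y)
  cases hrow : PySem.List.pyGet? mazeL y with
  | none => simp [validate_goal, validate_goal_alt, hrow]
  | some row =>
      cases hv : PySem.List.pyGet? row x with
      | none => simp [validate_goal, validate_goal_alt, hrow, hv]
      | some v =>
          by_cases h : v = 0 <;>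
            simp [validate_goal, validate_goal_alt, hrow, hv, h, aOuter_eval, bScan_eval]
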